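-- pv_equiv track=rewrite | github.com/XSiling/leetcode | 1653/answer.py | minimumDeletions
-- ===== SOURCE A (Python) =====
-- def minimumDeletions(s):
--     """
--     :type s: str
--     :rtype: int
--     """
--     term_a = [100001 for i in range(len(s))] # aaabbbbbb(begins with a)
--     term_b = [100001 for i in range(len(s))] # bbbbbbbbb(just with b)
--
--     for j in range(len(s)-1, -1, -1):
--         if j == (len(s)-1):
--             if s[j] == 'a':
--                 term_a[j] = 0
--                 term_b[j] = 1
--             else:
--                 term_a[j] = 100001
--                 term_b[j] = 0
--         else:
--             if s[j] == 'a':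
--                 term_a[j] = min(term_a[j+1], term_b[j+1])
--                 term_b[j] = min(100001, 1 + term_b[j+1])
--             else:
--                 term_a[j] = min(1 + term_a[j+1], 100001)
--                 term_b[j] = min(100001, term_b[j+1])
--
--     return min(term_a[0], term_b[0])
-- ===== SOURCE B (Python) =====
-- def minimumDeletions(s):
--     # Forward one-pass scan with O(1) state instead of A's backward two-array DP.
--     # Like A, counts saturate at A's constant 100001 (A caps every DP cell there).
--     if s[0] == 'a':
--         b_count, result = 0, 0
--     else:
--         b_count, result = 1, 0
--     for c in s[1:]:
--         if c == 'a':
--             result = min(result + 1, b_count)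
--         else:
--             b_count = min(b_count + 1, 100001)
--     return result
-- ===== Notes on version B (the rewrite author's own statement) =====
-- stated objective: simpler
-- what changed: Replaces A's backward two-array suffix DP (two length-n lists filled right-to-left, then min of the heads) with a single forward scan keeping two integer counters (b's seen, and min deletions so far, saturating at A's cap 100001); O(1) space and no list allocation.
import Mathlib
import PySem

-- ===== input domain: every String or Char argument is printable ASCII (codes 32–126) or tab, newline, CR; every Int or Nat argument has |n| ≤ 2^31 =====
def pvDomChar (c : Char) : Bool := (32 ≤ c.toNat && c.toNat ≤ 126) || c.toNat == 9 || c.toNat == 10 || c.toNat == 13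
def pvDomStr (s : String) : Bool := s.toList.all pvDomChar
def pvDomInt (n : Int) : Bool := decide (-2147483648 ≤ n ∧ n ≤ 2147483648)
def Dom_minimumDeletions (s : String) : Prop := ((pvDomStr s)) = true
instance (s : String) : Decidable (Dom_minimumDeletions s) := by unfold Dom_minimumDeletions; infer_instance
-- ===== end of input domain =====

-- B replaces A's backward two-array DP by a single forward scan with two integer counters (objective: simpler).

-- ===== PORT A =====
-- backward loop of A: goA l = (term_a[j], term_b[j]) for the suffix l = s[j:] (nonempty);
-- the [] case is never reached from a nonempty string (A's loop starts at the last index).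
def goA : List Char → Int × Int
  | [] => (100001, 100001)
  | [c] => if c = 'a' then (0, 1) else (100001, 0)
  | c :: d :: rest =>
      let p := goA (d :: rest)
      if c = 'a' then (min p.1 p.2, min 100001 (1 + p.2))
      else (min (1 + p.1) 100001, min 100001 p.2)

def minimumDeletions (s : String) : Int :=
  match s.toList with
  | [] => 0   -- Python A raises IndexError on the empty string (excluded by Pre_)
  | c :: rest => min (goA (c :: rest)).1 (goA (c :: rest)).2

-- ===== PORT B =====
-- forward loop of B over the remaining characters, state (b_count, result)
def goB : List Char → Int × Int → Int × Int
  | [], st => st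
  | c :: rest, (b, r) =>
      if c = 'a' then goB rest (b, min (r + 1) b)
      else goB rest (min (b + 1) 100001, r)

def minimumDeletions_alt (s : String) : Int :=
  match s.toList with
  | [] => 0   -- Python B raises IndexError on the empty string (excluded by Pre_)
  | c :: rest => (goB rest (if c = 'a' then (0, 0) else (1, 0))).2

-- ===== PRECONDITION & SPEC =====
-- Pre_ excludes only the empty string, on which both Pythons raise IndexError (s[0] / term_a[0]).
def Pre_minimumDeletions (s : String) : Prop := s ≠ ""
instance (s : String) : Decidable (Pre_minimumDeletions s) := by unfold Pre_minimumDeletions; infer_instance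
def pvWitness_minimumDeletions : String := "aababba"

def Spec_minimumDeletions (s : String) (out : Int) : Prop := out = minimumDeletions_alt s
instance (s : String) (out : Int) : Decidable (Spec_minimumDeletions s out) := by unfold Spec_minimumDeletions; infer_instance

-- ===== CLAIM (what is proved, stated in full; the proofs are below) =====
def Claim_equal_minimumDeletions : Prop := ∀ (s : String), Dom_minimumDeletions s → Pre_minimumDeletions s → Spec_minimumDeletions s (minimumDeletions s)

-- ===== LEMMAS AND PROOFS =====

-- one backward DP step of A, as a function (used only in the proofs)
def stepA (c : Char) (p : Int × Int) : Int × Int :=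
  if c = 'a' then (min p.1 p.2, min 100001 (1 + p.2))
  else (min (1 + p.1) 100001, min 100001 p.2)

-- number of 'a' characters, as an Int
def cntA : List Char → Int
  | [] => 0
  | c :: r => (if c = 'a' then 1 else 0) + cntA r

lemma cntA_nonneg (l : List Char) : 0 ≤ cntA l := by
  induction l with
  | nil => simp [cntA]
  | cons c r ih => simp only [cntA]; split <;> omega

lemma goA_eq_foldr (l : List Char) (h : l ≠ []) :
    goA l = List.foldr stepA (100001, 0) l := by
  induction l with
  | nil => exact absurd rfl h
  | cons c t ih =>
    cases t with
    | nil => simp [goA, stepA]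
    | cons d u =>
      have h2 := ih (by simp)
      simp only [goA, List.foldr_cons, stepA, h2]

lemma foldr_snd (l : List Char) :
    (List.foldr stepA (100001, 0) l).2 = min (cntA l) 100001 := by
  induction l with
  | nil => simp [cntA]
  | cons c t ih =>
    have := cntA_nonneg t
    simp only [List.foldr_cons, stepA, cntA]
    split <;> simp only [ih] <;> omega

lemma foldr_fst_bounds (l : List Char) :
    0 ≤ (List.foldr stepA (100001, 0) l).1 ∧ (List.foldr stepA (100001, 0) l).1 ≤ 100001 := by
  induction l with
  | nil => simp
  | cons c t ih =>
    have h2 := foldr_snd t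
    have h3 := cntA_nonneg t
    simp only [List.foldr_cons, stepA]
    split <;> simp only [] <;> omega

lemma goB_snd (l : List Char) : ∀ b r : Int, 0 ≤ b → b ≤ 100001 → 0 ≤ r → r ≤ 100001 →
    (goB l (b, r)).2
      = min (min (r + cntA l) (b + (List.foldr stepA (100001, 0) l).1)) 100001 := by
  induction l with
  | nil => intro b r h1 h2 h3 h4; simp [goB, cntA]; omega
  | cons c t ih =>
    intro b r h1 h2 h3 h4
    have hs := foldr_snd t
    have hb := foldr_fst_bounds t
    have hc := cntA_nonneg t
    simp only [goB, cntA, List.foldr_cons, stepA]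
    split
    · rw [ih b (min (r + 1) b) h1 h2 (by omega) (by omega)]
      omega
    · rw [ih (min (b + 1) 100001) r (by omega) (by omega) h3 h4]
      omega

lemma toList_ne_nil (s : String) (h : s ≠ "") : s.toList ≠ [] := by
  intro hn
  apply h
  have := congrArg String.ofList hn
  simpa using this

-- ===== VERDICT (by name: the statement is the Claim_ definition above) =====
theorem minimumDeletions_spec : Claim_equal_minimumDeletions := by
  intro s _ hpre
  unfold Spec_minimumDeletions minimumDeletions minimumDeletions_alt
  have hl := toList_ne_nil s hpre
  cases hcl : s.toList with
  | nil => exact absurd hcl hl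
  | cons c rest =>
    simp only []
    rw [goA_eq_foldr (c :: rest) (by simp)]
    have hs := foldr_snd rest
    have hb := foldr_fst_bounds rest
    have hc := cntA_nonneg rest
    by_cases hca : c = 'a'
    · rw [if_pos hca, goB_snd rest 0 0 (by omega) (by omega) (by omega) (by omega)]
      simp only [List.foldr_cons, stepA, hca, reduceIte]
      omega
    · rw [if_neg hca, goB_snd rest 1 0 (by omega) (by omega) (by omega) (by omega)]
      simp only [List.foldr_cons, stepA, if_neg hca]
      omega
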